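-- pv_equiv track=rewrite | github.com/pensnaku/juli_backend | app/shared/condition_utils.py | order_leading_conditions
-- ===== SOURCE A (Python) =====
-- from typing import List, Optional
--
-- DEPRESSION_CODE = "35489007"
--
-- ASTHMA_CODE = "195967001"
--
-- BIPOLAR_CODE = "13746004"
--
-- CHRONIC_PAIN_CODE = "82423001"
--
-- MIGRAINE_CODE = "37796009"
--
-- HEADACHE_CODE = "230461009"
--
-- HYPERTENSION_CODE = "38341003"
--
-- COPD_CODE = "13645005"
--
-- ANXIETY_CODE = "197480006"
--
-- DIABETES_CODE = "73211009"
--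
-- DRY_EYE_CODE = "162290004"
--
-- COMORBIDITY_ASTHMA_DEPRESSION_CODE = "195967001+35489007"
--
-- def order_leading_conditions(conditions: List[str]) -> List[str]:
--     """
--     Sort conditions by clinical priority/impact.
--
--     The leading condition determines:
--     - Which daily questionnaire is shown first
--     - Which condition's insights are prioritized
--     - The primary focus of the user's health journey
--
--     Args:
--         conditions: List of condition codes (SNOMED CT codes as strings)
--
--     Returns:
--         List of condition codes sorted by priority (highest priority first)
--         Only includes conditions that are in the input list.
--
--     Example:
--         >>> order_leading_conditions(["73211009", "37796009"])
--         ["37796009", "73211009"]  # Migraine before Diabetes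
--     """
--     # Default priority order (lower number = higher priority)
--     condition_priority = {
--         CHRONIC_PAIN_CODE: 0,
--         BIPOLAR_CODE: 1,
--         COPD_CODE: 2,
--         MIGRAINE_CODE: 3,
--         HEADACHE_CODE: 4,
--         DEPRESSION_CODE: 5,
--         ASTHMA_CODE: 6,
--         HYPERTENSION_CODE: 7,
--         COMORBIDITY_ASTHMA_DEPRESSION_CODE: 8,
--         ANXIETY_CODE: 9,
--         DIABETES_CODE: 10,
--         DRY_EYE_CODE: 11,
--     }
--
--     # Special case: If patient has Anxiety, adjust priorities
--     if ANXIETY_CODE in conditions: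
--         condition_priority[ASTHMA_CODE] = 3
--         condition_priority[ANXIETY_CODE] = 4
--         condition_priority[MIGRAINE_CODE] = 5
--         condition_priority[HEADACHE_CODE] = 6
--         condition_priority[DEPRESSION_CODE] = 7
--         condition_priority[HYPERTENSION_CODE] = 8
--         condition_priority[COMORBIDITY_ASTHMA_DEPRESSION_CODE] = 9
--         condition_priority[DIABETES_CODE] = 10
--         condition_priority[DRY_EYE_CODE] = 11
--
--     # Filter to only conditions the patient has, then sort by priority
--     patient_conditions = [c for c in condition_priority if c in set(conditions)]
--
--     return sorted(patient_conditions, key=lambda x: condition_priority[x])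
-- ===== SOURCE B (Python) =====
-- from typing import List
--
-- ANXIETY_CODE = "197480006"
--
-- # Priority order written out explicitly: one default list, one anxiety-adjusted list.
-- DEFAULT_ORDER = [
--     "82423001",   # chronic pain
--     "13746004",   # bipolar
--     "13645005",   # copd
--     "37796009",   # migraine
--     "230461009",  # headache
--     "35489007",   # depression
--     "195967001",  # asthma
--     "38341003",   # hypertension
--     "195967001+35489007",  # comorbidity asthma+depression
--     "197480006",  # anxiety
--     "73211009",   # diabetes
--     "162290004",  # dry eye
-- ]
--
-- ANXIETY_ORDER = [
--     "82423001",   # chronic pain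
--     "13746004",   # bipolar
--     "13645005",   # copd
--     "195967001",  # asthma
--     "197480006",  # anxiety
--     "37796009",   # migraine
--     "230461009",  # headache
--     "35489007",   # depression
--     "38341003",   # hypertension
--     "195967001+35489007",  # comorbidity asthma+depression
--     "73211009",   # diabetes
--     "162290004",  # dry eye
-- ]
--
-- def order_leading_conditions(conditions: List[str]) -> List[str]:
--     order = ANXIETY_ORDER if ANXIETY_CODE in conditions else DEFAULT_ORDER
--     return [c for c in order if c in conditions]
-- ===== Notes on version B (the rewrite author's own statement) =====
-- stated objective: simpler
-- what changed: Replaced the numeric-priority dict plus sorted(key=...) with two explicit pre-ordered code lists (default and anxiety-adjusted) and a single membership-filtering pass over the chosen list.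
import Mathlib
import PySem

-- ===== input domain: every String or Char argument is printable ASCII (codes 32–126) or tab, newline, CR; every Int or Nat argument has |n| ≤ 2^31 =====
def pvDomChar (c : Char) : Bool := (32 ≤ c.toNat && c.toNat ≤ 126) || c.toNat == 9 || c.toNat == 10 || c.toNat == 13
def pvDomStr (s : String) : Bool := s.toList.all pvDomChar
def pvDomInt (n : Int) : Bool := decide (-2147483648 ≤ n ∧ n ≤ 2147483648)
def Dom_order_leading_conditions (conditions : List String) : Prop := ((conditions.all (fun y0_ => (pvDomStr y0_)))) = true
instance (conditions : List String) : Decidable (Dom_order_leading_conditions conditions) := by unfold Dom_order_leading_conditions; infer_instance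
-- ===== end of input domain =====

-- B replaces A's priority-dict-and-sort with two explicit pre-ordered code lists and a single
-- membership filter (objective: simpler).

-- ===== PORT A =====
-- literal transliteration of A: build the priority dict, adjust it when anxiety is present,
-- filter the dict's keys by membership in set(conditions), then stable-sort by priority.
def order_leading_conditions (conditions : List String) : List String :=
  let cp : PySem.Dict String Int :=
    PySem.Dict.ofList [("82423001", 0), ("13746004", 1), ("13645005", 2), ("37796009", 3),
      ("230461009", 4), ("35489007", 5), ("195967001", 6), ("38341003", 7),
      ("195967001+35489007", 8), ("197480006", 9), ("73211009", 10), ("162290004", 11)]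
  let cp :=
    if "197480006" ∈ conditions then
      ((((((((cp.insert "195967001" 3).insert "197480006" 4).insert "37796009" 5).insert
        "230461009" 6).insert "35489007" 7).insert "38341003" 8).insert
        "195967001+35489007" 9).insert "73211009" 10).insert "162290004" 11
    else cp
  let condSet := PySem.Set.ofList conditions
  let patient := cp.keys.filter (fun c => PySem.Set.contains condSet c)
  -- condition_priority[x] never raises: every element of patient is a key of cp
  PySem.List.sorted patient (fun x => (cp.get? x).getD 0) false

-- ===== PORT B =====
def olcDefaultOrder : List String :=
  ["82423001", "13746004", "13645005", "37796009", "230461009", "35489007",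
   "195967001", "38341003", "195967001+35489007", "197480006", "73211009", "162290004"]

def olcAnxietyOrder : List String :=
  ["82423001", "13746004", "13645005", "195967001", "197480006", "37796009",
   "230461009", "35489007", "38341003", "195967001+35489007", "73211009", "162290004"]

def order_leading_conditions_alt (conditions : List String) : List String :=
  let order := if "197480006" ∈ conditions then olcAnxietyOrder else olcDefaultOrder
  order.filter (fun c => conditions.contains c)

-- ===== PRECONDITION & SPEC =====
def Spec_order_leading_conditions (conditions : List String) (out : List String) : Prop := out = order_leading_conditions_alt conditions
instance (conditions : List String) (out : List String) : Decidable (Spec_order_leading_conditions conditions out) := by unfold Spec_order_leading_conditions; infer_instance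

-- ===== CLAIM (what is proved, stated in full; the proofs are below) =====
def Claim_equal_order_leading_conditions : Prop := ∀ (conditions : List String), Dom_order_leading_conditions conditions → Spec_order_leading_conditions conditions (order_leading_conditions conditions)

-- ===== LEMMAS AND PROOFS =====

theorem olc_branch (conditions : List String)
    (cp : PySem.Dict String Int) (order : List String)
    (hperm : order.Perm cp.keys)
    (hpw : order.Pairwise (fun a b => ((cp.get? a).getD 0 : Int) < (cp.get? b).getD 0)) :
    PySem.List.sorted (cp.keys.filter (fun c => PySem.Set.contains (PySem.Set.ofList conditions) c))
      (fun x => (cp.get? x).getD 0) false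
      = order.filter (fun c => conditions.contains c) := by
  apply PySem.List.sorted_eq_of_perm_of_pairwise_lt
  · have hpred : ∀ c : String,
        conditions.contains c = PySem.Set.contains (PySem.Set.ofList conditions) c := by
      intro c
      simp [PySem.Set.contains_eq_listContains, PySem.Set.mem_ofList]
    rw [List.filter_congr (fun x _ => hpred x)]
    exact hperm.filter _
  · exact List.Pairwise.sublist List.filter_sublist hpw

-- ===== VERDICT (by name: the statement is the Claim_ definition above) =====
theorem order_leading_conditions_spec : Claim_equal_order_leading_conditions := by
  intro conditions _
  show order_leading_conditions conditions = order_leading_conditions_alt conditions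
  unfold order_leading_conditions order_leading_conditions_alt
  by_cases h : "197480006" ∈ conditions
  · simp only [if_pos h]
    exact olc_branch conditions _ olcAnxietyOrder (by decide) (by decide)
  · simp only [if_neg h]
    exact olc_branch conditions _ olcDefaultOrder (by decide) (by decide)
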